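-- pv_equiv track=rewrite | github.com/zdugi/ORI | 2048-expectimax/board.py | align_right
-- ===== SOURCE A (Python) =====
-- def align_right(matrix, out):
--     for i in range(4):
--         new_pos = 3
--         for j in reversed(range(4)):
--             if matrix[i][j] != 0:
--                 out[i][new_pos] = matrix[i][j]
--                 new_pos -= 1
--     return out
-- ===== SOURCE B (Python) =====
-- def align_right(matrix, out):
--     for i in range(4):
--         vals = [x for x in matrix[i][:4] if x != 0]
--         if vals:
--             out[i][4 - len(vals):4] = vals
--     return out
-- ===== Notes on version B (the rewrite author's own statement) =====
-- stated objective: alternative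
-- what changed: Replaces A's write-pointer scan with per-cell assignments by a per-row filter of the nonzero entries followed by a single bulk slice assignment that rebuilds the rightmost len(vals) cells of the row; the vacated left cells stay untouched and there is no positional loop at all.
import Mathlib
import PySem

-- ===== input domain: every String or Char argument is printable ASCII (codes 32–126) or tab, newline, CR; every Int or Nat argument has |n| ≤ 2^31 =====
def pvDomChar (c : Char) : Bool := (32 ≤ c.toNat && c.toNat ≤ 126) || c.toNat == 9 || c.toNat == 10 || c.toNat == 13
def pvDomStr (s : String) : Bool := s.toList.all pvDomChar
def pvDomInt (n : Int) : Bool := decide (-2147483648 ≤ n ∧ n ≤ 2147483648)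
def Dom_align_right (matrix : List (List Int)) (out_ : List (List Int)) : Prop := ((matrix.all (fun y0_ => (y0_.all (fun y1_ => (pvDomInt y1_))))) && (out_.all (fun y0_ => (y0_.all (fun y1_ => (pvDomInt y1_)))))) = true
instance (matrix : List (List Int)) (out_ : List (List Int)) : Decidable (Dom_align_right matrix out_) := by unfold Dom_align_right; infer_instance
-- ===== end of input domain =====

-- B replaces A's write-pointer scan (per-cell assignments) with a per-row filter of the nonzero
-- entries followed by ONE bulk slice assignment rebuilding the rightmost len(vals) cells
-- (alternative decomposition, same cost). Both Pythons mutate `out` in place identically on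
-- Pre_ inputs; the theorems here are about the returned value.

-- ===== PORT A =====
-- out[i][p] = v  (in-range on Pre_ inputs; model of the Python item assignment)
def pySetAt (out : List (List Int)) (i p : Nat) (v : Int) : List (List Int) :=
  out.set i ((out.getD i []).set p v)

-- inner loop of A: for j in reversed(range(4)): if matrix[i][j] != 0: out[i][new_pos] = …; new_pos -= 1
def alignRowA (matrix : List (List Int)) (out : List (List Int)) (i : Nat) : List (List Int) :=
  (((List.range 4).reverse).foldl
    (fun (st : List (List Int) × Nat) j =>
      if (matrix.getD i []).getD j 0 ≠ 0 then
        (pySetAt st.1 i st.2 ((matrix.getD i []).getD j 0), st.2 - 1)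
      else st)
    (out, 3)).1

def align_right (matrix : List (List Int)) (out_ : List (List Int)) : List (List Int) :=
  (List.range 4).foldl (alignRowA matrix) out_

-- ===== PORT B =====
-- vals = [x for x in matrix[i][:4] if x != 0]; if vals: out[i][4-len(vals):4] = vals
-- The slice assignment out[i][a:4] = vals (0 ≤ a ≤ 4) is exactly row.take a ++ vals ++ row.drop 4
-- (Python slice bounds and take/drop clamp identically); exact on the rows Pre_ admits.
def alignRowB (matrix : List (List Int)) (out : List (List Int)) (i : Nat) : List (List Int) :=
  let vals := ((matrix.getD i []).take 4).filter (fun x => x ≠ 0)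
  if vals = [] then out
  else out.set i ((out.getD i []).take (4 - vals.length) ++ vals ++ (out.getD i []).drop 4)

def align_right_alt (matrix : List (List Int)) (out_ : List (List Int)) : List (List Int) :=
  (List.range 4).foldl (alignRowB matrix) out_

-- ===== PRECONDITION & SPEC =====
-- Pre_: exactly where Python A returns (no IndexError): 4 rows with ≥ 4 entries each in matrix,
-- and whenever a row has a nonzero among its first 4 entries, out has a corresponding row of length ≥ 4.
def Pre_align_right (matrix : List (List Int)) (out_ : List (List Int)) : Prop :=
  4 ≤ matrix.length ∧
  (∀ i ∈ List.range 4, 4 ≤ (matrix.getD i []).length) ∧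
  (∀ i ∈ List.range 4, (((matrix.getD i []).take 4).any (fun x => x ≠ 0)) = true →
    i < out_.length ∧ 4 ≤ (out_.getD i []).length)
instance (matrix : List (List Int)) (out_ : List (List Int)) : Decidable (Pre_align_right matrix out_) := by unfold Pre_align_right; infer_instance

def pvWitness_align_right : List (List Int) × List (List Int) :=
  ([[2, 0, 2, 0], [0, 0, 0, 0], [4, 8, 2, 2], [0, 2, 0, 0]],
   [[0, 0, 0, 0], [0, 0, 0, 0], [0, 0, 0, 0], [0, 0, 0, 0]])

def Spec_align_right (matrix : List (List Int)) (out_ : List (List Int)) (out : List (List Int)) : Prop := out = align_right_alt matrix out_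
instance (matrix : List (List Int)) (out_ : List (List Int)) (out : List (List Int)) : Decidable (Spec_align_right matrix out_ out) := by unfold Spec_align_right; infer_instance

-- ===== CLAIM (what is proved, stated in full; the proofs are below) =====
def Claim_equal_align_right : Prop := ∀ (matrix : List (List Int)) (out_ : List (List Int)), Dom_align_right matrix out_ → Pre_align_right matrix out_ → Spec_align_right matrix out_ (align_right matrix out_)

-- ===== LEMMAS AND PROOFS =====

-- filtering the first four entries = filtering the four values A reads (missing entries read as 0 and are filtered out)
lemma filter_take_four (r : List Int) :
    ((r.take 4).filter (fun x => x ≠ 0)) =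
      ([r.getD 0 0, r.getD 1 0, r.getD 2 0, r.getD 3 0].filter (fun x => x ≠ 0)) := by
  rcases r with _ | ⟨a, _ | ⟨b, _ | ⟨c, _ | ⟨d, rest⟩⟩⟩⟩ <;> simp [List.getD, List.filter_cons]

-- per-row equality: A's write-pointer scan and B's bulk slice assignment produce the same row,
-- provided the out row has length ≥ 4 whenever there is something to write
lemma rowA_eq_rowB (matrix : List (List Int)) (out : List (List Int)) (i : Nat)
    (h : (((matrix.getD i []).take 4).filter (fun x => x ≠ 0)) ≠ [] →
         4 ≤ (out.getD i []).length) :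
    alignRowA matrix out i = alignRowB matrix out i := by
  rw [alignRowA, alignRowB]
  have hrev : (List.range 4).reverse = [3,2,1,0] := by decide
  rw [hrev, filter_take_four] at *
  set r := matrix.getD i [] with hrdef
  simp only [List.getD] at h ⊢
  by_cases h0 : r[0]?.getD 0 = 0 <;> by_cases h1 : r[1]?.getD 0 = 0 <;>
    by_cases h2 : r[2]?.getD 0 = 0 <;> by_cases h3 : r[3]?.getD 0 = 0
  all_goals first
  | (simp [h0, h1, h2, h3]; done)
  | {
    have hlen : 4 ≤ (out.getD i []).length := h (by simp [h0, h1, h2, h3])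
    have hi : i < out.length := by
      by_contra hc
      have : out.getD i [] = [] := by
        simp [List.getD, List.getElem?_eq_none (by omega : out.length ≤ i)]
      rw [this] at hlen; simp at hlen
    obtain ⟨x0, x1, x2, x3, rest, hr⟩ :
        ∃ x0 x1 x2 x3 rest, out.getD i [] = x0 :: x1 :: x2 :: x3 :: rest := by
      rcases hw : out.getD i [] with _ | ⟨a, _ | ⟨b, _ | ⟨c, _ | ⟨d, rs⟩⟩⟩⟩ <;>
        (try (rw [hw] at hlen; simp at hlen)) <;> exact ⟨a, b, c, d, rs, rfl⟩
    have hr' : out[i] = x0 :: x1 :: x2 :: x3 :: rest := by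
      simpa [List.getD, List.getElem?_eq_getElem hi] using hr
    simp [pySetAt, hr', List.getD, List.set_set, h0, h1, h2, h3, hi]
  }

-- B's step on row j leaves row i (i ≠ j) unchanged
lemma getD_rowB_ne (matrix : List (List Int)) (out : List (List Int)) (i j : Nat) (hij : i ≠ j) :
    ((alignRowB matrix out j).getD i []) = out.getD i [] := by
  rw [alignRowB]
  split
  · rfl
  · simp [List.getD, List.getElem?_set_ne (Ne.symm hij)]

-- a nonempty filter of the nonzeros means some entry tests nonzero
lemma filter_ne_nil_any (r : List Int)
    (hne : (r.take 4).filter (fun x => x ≠ 0) ≠ []) :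
    ((r.take 4).any (fun x => x ≠ 0)) = true := by
  by_contra hc
  apply hne
  rw [List.filter_eq_nil_iff]
  intro a ha
  simp only [List.any_eq_true] at hc
  push_neg at hc
  simpa using hc a ha

-- ===== VERDICT (by name: the statement is the Claim_ definition above) =====
theorem align_right_spec : Claim_equal_align_right := by
  intro matrix out_ _ hpre
  unfold Spec_align_right align_right align_right_alt
  obtain ⟨-, -, hout⟩ := hpre
  have hk : ∀ k, k < 4 → (((matrix.getD k []).take 4).filter (fun x => x ≠ 0)) ≠ [] →
      4 ≤ (out_.getD k []).length := by
    intro k hk4 hne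
    exact (hout k (by simpa using hk4) (filter_ne_nil_any _ hne)).2
  have hr4 : (List.range 4) = [0, 1, 2, 3] := by decide
  rw [hr4]
  simp only [List.foldl_cons, List.foldl_nil]
  rw [rowA_eq_rowB matrix out_ 0 (hk 0 (by omega))]
  rw [rowA_eq_rowB matrix _ 1 (by
    rw [getD_rowB_ne matrix out_ 1 0 (by omega)]; exact hk 1 (by omega))]
  rw [rowA_eq_rowB matrix _ 2 (by
    rw [getD_rowB_ne matrix _ 2 1 (by omega), getD_rowB_ne matrix out_ 2 0 (by omega)]
    exact hk 2 (by omega))]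
  rw [rowA_eq_rowB matrix _ 3 (by
    rw [getD_rowB_ne matrix _ 3 2 (by omega), getD_rowB_ne matrix _ 3 1 (by omega),
        getD_rowB_ne matrix out_ 3 0 (by omega)]
    exact hk 3 (by omega))]
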